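-- pv_equiv track=rewrite | github.com/Pangolierchick/IU7-TaDS-3-semester | lab_4/seq.py | find_subseq
-- ===== SOURCE A (Python) =====
-- def find_subseq(seq):
--     sub_seq = []
--
--     left = 0
--     right = 0
--
--     for i in range(len(seq)):
--         if seq[i - 1] <= seq[i]:
--             if right - left > 1:
--                 sub_seq.append(seq[left:right])
--
--             left = i
--         right += 1
--
--     if right - left > 1 and seq[right - 2] > seq[right - 1]:
--         sub_seq.append(seq[left:right])
--
--     return sub_seq
-- ===== SOURCE B (Python) =====
-- def find_subseq(seq):
--     # Peel maximal strictly-descending runs off the RIGHT end with an explicit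
--     # stack, building the output back-to-front; no index arithmetic, no
--     # trailing fix-up check.
--     stack = list(seq)
--     out = []
--     while stack:
--         run = [stack.pop()]
--         while stack and stack[-1] > run[-1]:
--             run.append(stack.pop())
--         if len(run) > 1:
--             out.append(run[::-1])
--     return out[::-1]
-- ===== Notes on version B (the rewrite author's own statement) =====
-- stated objective: alternative
-- what changed: Replaces A's left-to-right index scan with left/right pointers, deferred slice emission and a trailing descending-check by a stack-based algorithm that peels maximal strictly-descending runs off the right end of the sequence, building each run and the output back-to-front with pops instead of index arithmetic and slicing.
import Mathlib
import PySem

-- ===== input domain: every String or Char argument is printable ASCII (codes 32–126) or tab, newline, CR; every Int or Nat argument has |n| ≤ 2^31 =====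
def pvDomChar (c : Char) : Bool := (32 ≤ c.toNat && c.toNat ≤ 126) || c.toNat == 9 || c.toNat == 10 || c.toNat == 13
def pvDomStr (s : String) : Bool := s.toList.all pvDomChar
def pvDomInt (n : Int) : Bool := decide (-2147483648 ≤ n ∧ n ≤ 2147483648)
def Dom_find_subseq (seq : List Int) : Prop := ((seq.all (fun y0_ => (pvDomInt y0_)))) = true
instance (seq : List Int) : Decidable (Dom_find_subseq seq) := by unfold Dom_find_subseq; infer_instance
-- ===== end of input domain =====

-- B replaces A's left-to-right index scan (left/right pointers plus a trailing
-- descending-check) by peeling maximal strictly-descending runs off the RIGHT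
-- end with an explicit stack, building the output back-to-front; objective: alternative.

-- ===== PORT A =====
-- A's loop body; all indexing is in range on every reached access (i ∈ [0,n), so i-1 ∈ [-1,n-2)
-- is a valid Python index for nonempty seq; the final seq[right-2]/seq[right-1] accesses are
-- guarded by right-left>1), so pyGetD is exact here.
def pvStepA (seq : List Int) (s : List (List Int) × Int × Int) (i : Int) :
    List (List Int) × Int × Int :=
  if PySem.List.pyGetD seq (i - 1) 0 ≤ PySem.List.pyGetD seq i 0 then
    ((if s.2.2 - s.2.1 > 1 then s.1 ++ [PySem.List.slice seq (some s.2.1) (some s.2.2)] else s.1),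
      i, s.2.2 + 1)
  else (s.1, s.2.1, s.2.2 + 1)

def find_subseq (seq : List Int) : List (List Int) :=
  let st := (PySem.List.pyRange 0 (seq.length : Int) 1).foldl (pvStepA seq) ([], 0, 0)
  if st.2.2 - st.2.1 > 1 ∧
      PySem.List.pyGetD seq (st.2.2 - 2) 0 > PySem.List.pyGetD seq (st.2.2 - 1) 0 then
    st.1 ++ [PySem.List.slice seq (some st.2.1) (some st.2.2)]
  else st.1

-- ===== PORT B =====
-- The stack holds the not-yet-peeled prefix of seq with its TOP (= Python's right end,
-- where .pop() acts) at the head; the current run is kept with its most recently popped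
-- (leftmost) element at the head, so it is already in left-to-right order (= run[::-1]).

-- inner while loop: 'while stack and stack[-1] > run[-1]: run.append(stack.pop())'
def pvGrow : List Int → List Int → List Int × List Int
  | t :: rest, acc => if acc.headD 0 < t then pvGrow rest (t :: acc) else (acc, t :: rest)
  | [], acc => (acc, [])

lemma pvGrow_snd_length (s acc : List Int) : (pvGrow s acc).2.length ≤ s.length := by
  induction s generalizing acc with
  | nil => simp [pvGrow]
  | cons t rest ih =>
      simp only [pvGrow]
      split
      · exact le_trans (ih (t :: acc)) (Nat.le_succ _)
      · simp

-- outer while loop: pop one element, grow the run, emit it if len > 1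
def pvPeelB : List Int → List (List Int) → List (List Int)
  | [], out => out
  | t :: rest, out =>
      let p := pvGrow rest [t]
      pvPeelB p.2 (if p.1.length > 1 then p.1 :: out else out)
termination_by s _ => s.length
decreasing_by exact Nat.lt_succ_of_le (pvGrow_snd_length rest [t])

def find_subseq_alt (seq : List Int) : List (List Int) :=
  pvPeelB seq.reverse []

-- ===== PRECONDITION & SPEC =====
def Spec_find_subseq (seq : List Int) (out : List (List Int)) : Prop := out = find_subseq_alt seq
instance (seq : List Int) (out : List (List Int)) : Decidable (Spec_find_subseq seq out) := by unfold Spec_find_subseq; infer_instance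

-- ===== CLAIM (what is proved, stated in full; the proofs are below) =====
def Claim_equal_find_subseq : Prop := ∀ (seq : List Int), Dom_find_subseq seq → Spec_find_subseq seq (find_subseq seq)

-- ===== LEMMAS AND PROOFS =====

-- proof-only intermediate form: run boundaries and the slices they cut out
def pvBreaks (seq : List Int) (m : Int) : List Int :=
  (PySem.List.pyRange 1 m 1).filter
    (fun i => PySem.List.pyGetD seq i 0 ≥ PySem.List.pyGetD seq (i - 1) 0)

def pvEmit (seq : List Int) (starts : List Int) : List (List Int) :=
  ((starts.zip (starts.drop 1)).filter (fun p => p.2 - p.1 > 1)).map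
    (fun p => PySem.List.slice seq (some p.1) (some p.2))

lemma emit_cons_cons (seq : List Int) (a b : Int) (r : List Int) :
    pvEmit seq (a :: b :: r)
      = (if b - a > 1 then [PySem.List.slice seq (some a) (some b)] else [])
        ++ pvEmit seq (b :: r) := by
  by_cases h : b - a > 1 <;>
    simp [pvEmit, h]

lemma emit_append (seq : List Int) (a : Int) (l : List Int) (x : Int) :
    pvEmit seq (a :: (l ++ [x]))
      = pvEmit seq (a :: l)
        ++ (if x - l.getLastD a > 1
            then [PySem.List.slice seq (some (l.getLastD a)) (some x)] else []) := by
  induction l generalizing a with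
  | nil =>
      by_cases h : x - a > 1 <;>
        simp [pvEmit, h]
  | cons b t ih =>
      simp only [List.cons_append, emit_cons_cons, List.getLastD_cons]
      rw [ih b]
      simp

lemma loop_inv (seq : List Int) (m : Nat) (h1 : 1 ≤ m) (h2 : m ≤ seq.length) :
    (PySem.List.pyRange 0 (m : Int) 1).foldl (pvStepA seq) ([], 0, 0)
      = (pvEmit seq (0 :: pvBreaks seq (m : Int)),
         (pvBreaks seq (m : Int)).getLastD 0, (m : Int))
    ∧ (∀ j : Int, (pvBreaks seq (m : Int)).getLastD 0 < j → j < (m : Int) →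
        PySem.List.pyGetD seq j 0 < PySem.List.pyGetD seq (j - 1) 0) := by
  induction m with
  | zero => omega
  | succ m ih =>
      push_cast
      rcases Nat.eq_or_lt_of_le h1 with hbase | hstep
      · -- m + 1 = 1 : the i = 0 iteration only increments right
        have hm : m = 0 := by omega
        subst hm
        norm_num
        have hr : PySem.List.pyRange 0 (1 : Int) 1 = [0] := by decide
        have hb0 : pvBreaks seq (1 : Int) = [] := by
          have : PySem.List.pyRange 1 (1 : Int) 1 = [] := by decide
          simp [pvBreaks, this]
        constructor
        · rw [hr, hb0]
          simp only [List.foldl_cons, List.foldl_nil, pvStepA, pvEmit]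
          split <;> simp
        · intro j hj1 hj2
          rw [hb0] at hj1
          simp at hj1
          omega
      · -- inductive step: peel off iteration i = m
        have hm1 : 1 ≤ m := by omega
        obtain ⟨hfold, hnb⟩ := ih hm1 (by omega)
        have hsplit : PySem.List.pyRange 0 ((m : Int) + 1) 1
            = PySem.List.pyRange 0 (m : Int) 1 ++ [(m : Int)] :=
          PySem.List.pyRange_one_succ_right (by positivity)
        have hbsplit : PySem.List.pyRange 1 ((m : Int) + 1) 1
            = PySem.List.pyRange 1 (m : Int) 1 ++ [(m : Int)] :=
          PySem.List.pyRange_one_succ_right (by exact_mod_cast hm1)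
        have hbreaks : pvBreaks seq ((m : Int) + 1)
            = pvBreaks seq (m : Int)
              ++ (if PySem.List.pyGetD seq (m : Int) 0 ≥ PySem.List.pyGetD seq ((m : Int) - 1) 0
                  then [(m : Int)] else []) := by
          simp only [pvBreaks, hbsplit, List.filter_append, List.filter_cons,
            List.filter_nil, decide_eq_true_eq]
        rw [hsplit, List.foldl_append, hfold, List.foldl_cons, List.foldl_nil]
        by_cases hc : PySem.List.pyGetD seq ((m : Int) - 1) 0 ≤ PySem.List.pyGetD seq (m : Int) 0
        · -- break at m : a run ends here
          have hcb : pvBreaks seq ((m : Int) + 1) = pvBreaks seq (m : Int) ++ [(m : Int)] := by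
            rw [hbreaks, if_pos hc]
          refine ⟨?_, ?_⟩
          · simp only [pvStepA, if_pos hc, hcb]
            rw [emit_append seq 0 (pvBreaks seq (m : Int)) (m : Int), List.getLastD_concat]
            split_ifs <;> simp
          · intro j hj1 hj2
            rw [hcb, List.getLastD_concat] at hj1
            omega
        · -- no break at m : state and breaks unchanged
          have hcb : pvBreaks seq ((m : Int) + 1) = pvBreaks seq (m : Int) := by
            rw [hbreaks, if_neg hc]
            simp
          refine ⟨?_, ?_⟩
          · simp only [pvStepA]
            rw [if_neg hc, hcb]
          · intro j hj1 hj2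
            rw [hcb] at hj1
            rcases lt_or_eq_of_le (by omega : j ≤ (m : Int)) with h | h
            · exact hnb j hj1 h
            · subst h
              omega

-- A equals the boundary/emit form
lemma A_eq_emit (seq : List Int) :
    find_subseq seq
      = pvEmit seq (0 :: (pvBreaks seq (seq.length : Int) ++ [(seq.length : Int)])) := by
  rcases seq with _ | ⟨x, xs⟩
  · rfl
  · set seq := x :: xs with hseq
    have hn : 1 ≤ seq.length := by simp [hseq]
    obtain ⟨hfold, hnb⟩ := loop_inv seq seq.length hn le_rfl
    set L := (pvBreaks seq (seq.length : Int)).getLastD 0 with hL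
    have halt : pvEmit seq (0 :: (pvBreaks seq (seq.length : Int) ++ [(seq.length : Int)]))
        = pvEmit seq (0 :: pvBreaks seq (seq.length : Int))
          ++ (if (seq.length : Int) - L > 1
              then [PySem.List.slice seq (some L) (some (seq.length : Int))] else []) := by
      rw [emit_append]
    rw [halt]
    show (let st := (PySem.List.pyRange 0 (seq.length : Int) 1).foldl (pvStepA seq) ([], 0, 0);
      if st.2.2 - st.2.1 > 1 ∧
          PySem.List.pyGetD seq (st.2.2 - 2) 0 > PySem.List.pyGetD seq (st.2.2 - 1) 0 then
        st.1 ++ [PySem.List.slice seq (some st.2.1) (some st.2.2)]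
      else st.1) = _
    rw [hfold]
    by_cases hgap : (seq.length : Int) - L > 1
    · have hdesc : PySem.List.pyGetD seq ((seq.length : Int) - 1) 0
          < PySem.List.pyGetD seq ((seq.length : Int) - 1 - 1) 0 :=
        hnb ((seq.length : Int) - 1) (by omega) (by omega)
      have h2 : (seq.length : Int) - 1 - 1 = (seq.length : Int) - 2 := by ring
      rw [h2] at hdesc
      simp only [if_pos hgap]
      rw [if_pos ⟨hgap, hdesc⟩]
    · simp only [if_neg hgap]
      rw [if_neg (by intro h; exact hgap h.1)]
      simp

-- ---- facts about pvGrow ----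

lemma pvGrow_conserve (s acc : List Int) :
    (pvGrow s acc).1.reverse ++ (pvGrow s acc).2 = acc.reverse ++ s := by
  induction s generalizing acc with
  | nil => simp [pvGrow]
  | cons t rest ih =>
      simp only [pvGrow]
      split
      · rw [ih (t :: acc)]; simp
      · simp

lemma pvGrow_fst_ne_nil (s : List Int) (r : Int) (rs : List Int) :
    (pvGrow s (r :: rs)).1 ≠ [] := by
  induction s generalizing r rs with
  | nil => simp [pvGrow]
  | cons t rest ih =>
      simp only [pvGrow]
      split
      · exact ih t (r :: rs)
      · simp

lemma pvGrow_chain (s : List Int) (r : Int) (rs : List Int)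
    (h : List.IsChain (· > ·) (r :: rs)) :
    List.IsChain (· > ·) (pvGrow s (r :: rs)).1 := by
  induction s generalizing r rs with
  | nil => simpa [pvGrow] using h
  | cons t rest ih =>
      simp only [pvGrow]
      split
      · rename_i hc
        exact ih t (r :: rs) (List.isChain_cons_cons.mpr ⟨by simpa using hc, h⟩)
      · exact h

lemma pvGrow_stop (s : List Int) (r : Int) (rs : List Int) (t' : Int) (rest' : List Int)
    (h : (pvGrow s (r :: rs)).2 = t' :: rest') :
    t' ≤ (pvGrow s (r :: rs)).1.headD 0 := by
  induction s generalizing r rs with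
  | nil => simp [pvGrow] at h
  | cons t rest ih =>
      simp only [pvGrow] at h ⊢
      split
      · rename_i hc
        rw [if_pos hc] at h
        exact ih t (r :: rs) h
      · rename_i hc
        rw [if_neg hc] at h
        simp only [List.headD_cons] at hc ⊢
        cases h
        omega

-- ---- indexed consequences ----

lemma chain_descending_getD (l : List Int) (h : List.IsChain (· > ·) l)
    (j : Nat) (hj1 : 0 < j) (hj2 : j < l.length) :
    l.getD j 0 < l.getD (j - 1) 0 := by
  rw [List.getD_eq_getElem _ _ hj2, List.getD_eq_getElem _ _ (by omega)]
  have := h.getElem (j - 1) (by omega)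
  simpa [Nat.sub_add_cancel hj1] using this

-- indexing a concatenation inside / past the prefix
lemma pyGetD_prefix (front run : List Int) (i : Int) (h0 : 0 ≤ i) (h : i < (front.length : Int)) :
    PySem.List.pyGetD (front ++ run) i 0 = PySem.List.pyGetD front i 0 := by
  obtain ⟨j, rfl⟩ := Int.eq_ofNat_of_zero_le h0
  rw [PySem.List.pyGetD_natCast, PySem.List.pyGetD_natCast,
    List.getD_append _ _ _ _ (by exact_mod_cast h)]

lemma pyGetD_suffix (front run : List Int) (i : Int) (h0 : (front.length : Int) ≤ i) :
    PySem.List.pyGetD (front ++ run) i 0 = run.getD (i - front.length).toNat 0 := by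
  obtain ⟨j, rfl⟩ := Int.eq_ofNat_of_zero_le (le_trans (by positivity) h0)
  rw [PySem.List.pyGetD_natCast, List.getD_append_right _ _ _ _ (by exact_mod_cast h0)]
  congr 1
  omega

-- a strictly descending list has no run boundary
lemma breaks_desc_shift (front run : List Int) (hchain : List.IsChain (· > ·) run)
    (a : Int) (ha : (front.length : Int) < a) :
    (PySem.List.pyRange a ((front.length + run.length : Nat) : Int) 1).filter
      (fun i => PySem.List.pyGetD (front ++ run) i 0 ≥ PySem.List.pyGetD (front ++ run) (i - 1) 0)
      = [] := by
  rw [List.filter_eq_nil_iff]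
  intro i hi
  rw [PySem.List.mem_pyRange_one] at hi
  have h1 : PySem.List.pyGetD (front ++ run) i 0 = run.getD (i - front.length).toNat 0 :=
    pyGetD_suffix front run i (by omega)
  have h2 : PySem.List.pyGetD (front ++ run) (i - 1) 0 = run.getD (i - 1 - front.length).toNat 0 :=
    pyGetD_suffix front run (i - 1) (by omega)
  have hlt : run.getD (i - front.length).toNat 0 < run.getD ((i - front.length).toNat - 1) 0 :=
    chain_descending_getD run hchain (i - front.length).toNat (by omega) (by omega)
  have he : (i - 1 - front.length).toNat = (i - front.length).toNat - 1 := by omega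
  simp only [h1, h2, he, decide_eq_true_eq]
  omega

-- splitting the boundary list at the start of the last run
lemma breaks_split (front run : List Int) (hf : front ≠ []) (hr : run ≠ [])
    (hchain : List.IsChain (· > ·) run)
    (hstop : front.getLastD 0 ≤ run.headD 0) :
    pvBreaks (front ++ run) (((front ++ run).length : Nat) : Int)
      = pvBreaks front (front.length : Int) ++ [(front.length : Int)] := by
  have hf1 : 1 ≤ front.length := List.length_pos_iff.mpr hf
  have hr1 : 1 ≤ run.length := List.length_pos_iff.mpr hr
  rw [pvBreaks, List.length_append,
    PySem.List.pyRange_one_append 1 (front.length : Int) ((front.length + run.length : Nat) : Int)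
      (by exact_mod_cast hf1) (by push_cast; omega),
    List.filter_append]
  congr 1
  · -- boundaries strictly inside the front are the front's boundaries
    rw [pvBreaks]
    apply List.filter_congr
    intro i hi
    rw [PySem.List.mem_pyRange_one] at hi
    rw [pyGetD_prefix front run i (by omega) (by omega),
      pyGetD_prefix front run (i - 1) (by omega) (by omega)]
  · -- front.length is a boundary, and the run has none inside
    rw [PySem.List.pyRange_one_cons (by push_cast; omega), List.filter_cons]
    have hb : PySem.List.pyGetD (front ++ run) ((front.length : Nat) : Int) 0
        = run.getD 0 0 := by
      rw [pyGetD_suffix front run _ le_rfl]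
      congr 1
      omega
    have hb' : PySem.List.pyGetD (front ++ run) (((front.length : Nat) : Int) - 1) 0
        = front.getD (front.length - 1) 0 := by
      rw [pyGetD_prefix front run _ (by omega) (by omega)]
      have : ((front.length : Int) - 1) = ((front.length - 1 : Nat) : Int) := by omega
      rw [this, PySem.List.pyGetD_natCast]
    have hlastD : front.getD (front.length - 1) 0 = front.getLastD 0 := by
      rw [List.getD_eq_getElem _ _ (by omega), List.getLastD_eq_getLast?,
        List.getLast?_eq_getElem?, List.getElem?_eq_getElem (by omega)]
      rfl
    have hhead : run.getD 0 0 = run.headD 0 := by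
      cases run with
      | nil => simp at hr1
      | cons a l => simp
    have hcond : PySem.List.pyGetD (front ++ run) ((front.length : Nat) : Int) 0
        ≥ PySem.List.pyGetD (front ++ run) (((front.length : Nat) : Int) - 1) 0 := by
      rw [hb, hb', hlastD, hhead]
      exact hstop
    rw [if_pos (by exact decide_eq_true hcond),
      breaks_desc_shift front run hchain _ (by omega)]

-- slices bounded by the prefix ignore the suffix
lemma slice_prefix (front run : List Int) (a b : Int)
    (ha : 0 ≤ a) (hb0 : 0 ≤ b) (hb : b ≤ (front.length : Int)) :
    PySem.List.slice (front ++ run) (some a) (some b) = PySem.List.slice front (some a) (some b) := by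
  rw [PySem.List.slice_toNat (front ++ run) ha hb0, PySem.List.slice_toNat front ha hb0]
  by_cases hab : a.toNat ≤ b.toNat
  · rw [List.drop_append_of_le_length (by omega), List.take_append_of_le_length (by simp; omega)]
  · have : b.toNat - a.toNat = 0 := by omega
    simp [this]

lemma emit_prefix (front run : List Int) (starts : List Int)
    (hbnd : ∀ x ∈ starts, 0 ≤ x ∧ x ≤ (front.length : Int)) :
    pvEmit (front ++ run) starts = pvEmit front starts := by
  unfold pvEmit
  apply List.map_congr_left
  intro p hp
  have hz := List.of_mem_zip (List.mem_of_mem_filter hp)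
  obtain ⟨h1, h2⟩ := hz
  have h2' : p.2 ∈ starts := List.mem_of_mem_drop h2
  obtain ⟨ha0, _⟩ := hbnd p.1 h1
  obtain ⟨hb0, hbf⟩ := hbnd p.2 h2'
  exact slice_prefix front run p.1 p.2 ha0 hb0 hbf

-- the tail run itself is the last slice
lemma slice_suffix (front run : List Int) :
    PySem.List.slice (front ++ run) (some ((front.length : Nat) : Int))
      (some (((front ++ run).length : Nat) : Int)) = run := by
  rw [List.length_append]
  have : ((front.length + run.length : Nat) : Int) = ((front.length : Nat) : Int) + ((run.length : Nat) : Int) := by push_cast; ring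
  rw [this, PySem.List.slice_natCast_add, List.drop_left, List.take_length]

-- pushing the conditional emission through the accumulator
lemma if_cons_out (c : Prop) [Decidable c] (x : List Int) (out : List (List Int)) :
    (if c then x :: out else out) = (if c then [x] else []) ++ out := by
  split <;> simp

-- the main bridge: B's peeling computes the emit form
lemma peel_eq_emit (N : Nat) : ∀ (seq : List Int), seq.length ≤ N → ∀ out,
    pvPeelB seq.reverse out
      = pvEmit seq (0 :: (pvBreaks seq (seq.length : Int) ++ [(seq.length : Int)])) ++ out := by
  induction N with
  | zero =>
      intro seq hlen out
      have : seq = [] := List.length_eq_zero_iff.mp (by omega)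
      subst this
      simp [pvPeelB, pvBreaks, pvEmit, PySem.List.pyRange_one_eq_nil]
  | succ N ih =>
      intro seq hlen out
      by_cases hseq : seq = []
      · subst hseq
        simp [pvPeelB, pvBreaks, pvEmit, PySem.List.pyRange_one_eq_nil]
      · obtain ⟨t, rest, hrev⟩ :=
          List.exists_cons_of_ne_nil (by simpa using hseq : seq.reverse ≠ [])
        have hcons : pvPeelB seq.reverse out
            = pvPeelB (pvGrow rest [t]).2
                (if (pvGrow rest [t]).1.length > 1 then (pvGrow rest [t]).1 :: out else out) := by
          rw [hrev, pvPeelB]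
        set run := (pvGrow rest [t]).1 with hrun
        set st' := (pvGrow rest [t]).2 with hst'
        have hcons' : run.reverse ++ st' = seq.reverse := by
          rw [hrun, hst', pvGrow_conserve]
          simpa using hrev.symm
        have hdecomp : seq = st'.reverse ++ run := by
          have := congrArg List.reverse hcons'
          simp at this
          exact this.symm
        have hrne : run ≠ [] := pvGrow_fst_ne_nil rest t []
        have hchain : List.IsChain (· > ·) run := pvGrow_chain rest t [] (List.IsChain.singleton t)
        set front := st'.reverse with hfront
        have hflen : front.length + run.length = seq.length := by
          rw [hdecomp]; simp [hfront]
        by_cases hfe : front = []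
        · -- the whole seq is a single descending run
          have hseqrun : seq = run := by rw [hdecomp, hfe]; simp
          have hst'e : st' = [] := by simpa [hfront] using congrArg List.reverse hfe
          have hbr : pvBreaks seq (seq.length : Int) = [] := by
            rw [pvBreaks, hseqrun]
            have := breaks_desc_shift [] run hchain 1 (by simp)
            simpa using this
          have hemit : pvEmit seq (0 :: ([] ++ [(seq.length : Int)]))
              = (if (seq.length : Int) - 0 > 1
                  then [PySem.List.slice seq (some 0) (some (seq.length : Int))] else []) := by
            have := emit_append seq 0 [] (seq.length : Int)
            simpa [pvEmit] using this
          have hslice : PySem.List.slice seq (some 0) (some (seq.length : Int)) = seq := by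
            have h0 : ((0 : Nat) : Int) = (0 : Int) := by norm_num
            rw [← h0, PySem.List.slice_natCast]
            simp
          rw [hcons, hst'e, pvPeelB, hbr, if_cons_out]
          congr 1
          rw [hemit, hslice, hseqrun]
          by_cases hl : run.length > 1
          · rw [if_pos hl, if_pos (by omega)]
          · rw [if_neg hl, if_neg (by omega)]
        · -- peel the last run off and use the induction hypothesis on the front
          have hfne' : st' ≠ [] := by
            intro h; exact hfe (by simp [hfront, h])
          obtain ⟨t', rest', hst'c⟩ := List.exists_cons_of_ne_nil hfne'
          have hstop : front.getLastD 0 ≤ run.headD 0 := by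
            have h1 : t' ≤ run.headD 0 := pvGrow_stop rest t [] t' rest' (by rw [← hst']; exact hst'c)
            have h2 : front.getLastD 0 = t' := by
              rw [hfront, List.getLastD_eq_getLast?, List.getLast?_reverse, hst'c]
              simp
            omega
          have hflt : front.length < seq.length := by
            have : 1 ≤ run.length := List.length_pos_iff.mpr hrne
            omega
          have hbr : pvBreaks seq (seq.length : Int)
              = pvBreaks front (front.length : Int) ++ [(front.length : Int)] := by
            rw [hdecomp]
            have := breaks_split front run hfe hrne hchain hstop
            simpa [hfront] using this
          have hst'f : st' = front.reverse := by simp [hfront]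
          rw [hcons, hst'f, if_cons_out,
            ih front (by omega) ((if run.length > 1 then [run] else []) ++ out), hbr]
          -- now rewrite the emit form of seq
          have hlast : (pvBreaks front (front.length : Int) ++ [(front.length : Int)]).getLastD 0
              = (front.length : Int) := List.getLastD_concat
          have hsplit2 : pvEmit seq
                (0 :: ((pvBreaks front (front.length : Int) ++ [(front.length : Int)]) ++ [(seq.length : Int)]))
              = pvEmit seq (0 :: (pvBreaks front (front.length : Int) ++ [(front.length : Int)]))
                ++ (if (seq.length : Int) - (front.length : Int) > 1
                    then [PySem.List.slice seq (some (front.length : Int)) (some (seq.length : Int))]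
                    else []) := by
            rw [emit_append, hlast]
          have hbndF : ∀ x ∈ (0 : Int) :: (pvBreaks front (front.length : Int) ++ [(front.length : Int)]),
              0 ≤ x ∧ x ≤ (front.length : Int) := by
            intro x hx
            rcases List.mem_cons.mp hx with h | h
            · subst h; exact ⟨le_refl 0, by positivity⟩
            · rcases List.mem_append.mp h with h | h
              · have hsub : x ∈ PySem.List.pyRange 1 (front.length : Int) 1 :=
                  List.mem_of_mem_filter h
                rw [PySem.List.mem_pyRange_one] at hsub
                omega
              · simp at h; subst h; exact ⟨by positivity, le_refl _⟩
          have hemitF : pvEmit seq (0 :: (pvBreaks front (front.length : Int) ++ [(front.length : Int)]))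
              = pvEmit front (0 :: (pvBreaks front (front.length : Int) ++ [(front.length : Int)])) := by
            rw [hdecomp]
            exact emit_prefix front run _ hbndF
          have hslice : PySem.List.slice seq (some (front.length : Int)) (some (seq.length : Int)) = run := by
            conv_lhs => rw [hdecomp]
            have := slice_suffix front run
            rw [← hdecomp] at this ⊢
            exact this
          have hifeq : (if (seq.length : Int) - (front.length : Int) > 1
                    then [PySem.List.slice seq (some (front.length : Int)) (some (seq.length : Int))]
                    else [])
              = (if run.length > 1 then [run] else []) := by
            rw [hslice]
            by_cases hl : run.length > 1
            · rw [if_pos (by omega), if_pos hl]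
            · rw [if_neg (by omega), if_neg hl]
          rw [hsplit2, hemitF, hifeq, List.append_assoc]

-- ===== VERDICT (by name: the statement is the Claim_ definition above) =====
theorem find_subseq_spec : Claim_equal_find_subseq := by
  intro seq _
  show find_subseq seq = find_subseq_alt seq
  rw [A_eq_emit]
  have := peel_eq_emit seq.length seq le_rfl []
  simpa [find_subseq_alt] using this.symm
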